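-- pv_equiv track=rewrite | github.com/AIGOJMASON/ai-go-market-analyzer | AI_GO/core/watcher/enforcement_watcher.py | _classify_violation_from_codes
-- ===== SOURCE A (Python) =====
-- from typing import Any, Dict, List, Set
--
-- def _classify_violation_from_codes(codes: Set[str]) -> str:
--     if "forbidden_authority_claim" in codes:
--         return "authority_inflation"
--
--     if "raw_external_child_core_bypass" in codes:
--         return "cross_core_bypass"
--
--     if "root_spine_order_invalid" in codes or "root_spine_required_links_missing" in codes:
--         return "invalid_spine_order"
--
--     if "research_core_lineage_missing" in codes:
--         return "missing_lineage"
--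
--     if "engine_lineage_missing" in codes:
--         return "missing_engine_processing"
--
--     if "adapter_lineage_missing" in codes:
--         return "missing_adapter_layer"
--
--     if "legacy_raw_live_route_disabled" in codes:
--         return "route_violation"
--
--     if "curated_engine_handoff_packet_missing" in codes:
--         return "missing_curated_packet"
--
--     if "curated_engine_handoff_shape_invalid" in codes:
--         return "invalid_curated_packet"
--
--     if "raw_live_payload_rejected" in codes:
--         return "raw_payload_rejected"
--
--     if any(code.startswith("execution_") for code in codes):
--         return "execution_violation"
--
--     return "unknown_violation"
-- ===== SOURCE B (Python) =====
-- _PRIORITY = {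
--     "forbidden_authority_claim": (0, "authority_inflation"),
--     "raw_external_child_core_bypass": (1, "cross_core_bypass"),
--     "root_spine_order_invalid": (2, "invalid_spine_order"),
--     "root_spine_required_links_missing": (2, "invalid_spine_order"),
--     "research_core_lineage_missing": (3, "missing_lineage"),
--     "engine_lineage_missing": (4, "missing_engine_processing"),
--     "adapter_lineage_missing": (5, "missing_adapter_layer"),
--     "legacy_raw_live_route_disabled": (6, "route_violation"),
--     "curated_engine_handoff_packet_missing": (7, "missing_curated_packet"),
--     "curated_engine_handoff_shape_invalid": (8, "invalid_curated_packet"),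
--     "raw_live_payload_rejected": (9, "raw_payload_rejected"),
-- }
--
-- def _classify_violation_from_codes(codes):
--     # One pass over the codes: score each code by its priority rank and keep
--     # the best (lowest-rank) entry seen; the rank fully determines the label.
--     best = (11, "unknown_violation")
--     for code in codes:
--         entry = _PRIORITY.get(code)
--         if entry is None and code.startswith("execution_"):
--             entry = (10, "execution_violation")
--         if entry is not None and entry[0] < best[0]:
--             best = entry
--     return best[1]
-- ===== Notes on version B (the rewrite author's own statement) =====
-- stated objective: alternative
-- what changed: Instead of testing each rule against the set in priority order, B makes one pass over the codes themselves, ranking each code via a code-to-(priority,label) table (with an execution_ prefix fallback) and keeping the minimum-priority entry.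
import Mathlib
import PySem

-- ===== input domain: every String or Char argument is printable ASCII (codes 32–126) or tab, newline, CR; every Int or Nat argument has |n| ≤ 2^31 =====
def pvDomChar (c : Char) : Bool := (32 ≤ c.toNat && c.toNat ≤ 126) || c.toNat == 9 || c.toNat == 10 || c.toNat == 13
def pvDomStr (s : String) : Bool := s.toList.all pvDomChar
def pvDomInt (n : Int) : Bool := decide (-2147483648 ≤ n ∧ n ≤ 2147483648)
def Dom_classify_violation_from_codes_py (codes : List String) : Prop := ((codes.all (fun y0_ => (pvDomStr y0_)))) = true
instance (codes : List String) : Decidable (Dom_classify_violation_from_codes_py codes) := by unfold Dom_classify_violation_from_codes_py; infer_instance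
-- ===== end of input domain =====

-- B replaces A's rule-by-rule membership chain with a single pass over the codes that ranks
-- each code through a code-to-(priority,label) table and keeps the minimum-priority entry.


-- ===== PORT A =====
def classify_violation_from_codes_py (codes : List String) : String :=
  if codes.contains "forbidden_authority_claim" then "authority_inflation"
  else if codes.contains "raw_external_child_core_bypass" then "cross_core_bypass"
  else if codes.contains "root_spine_order_invalid" || codes.contains "root_spine_required_links_missing" then "invalid_spine_order"
  else if codes.contains "research_core_lineage_missing" then "missing_lineage"
  else if codes.contains "engine_lineage_missing" then "missing_engine_processing"
  else if codes.contains "adapter_lineage_missing" then "missing_adapter_layer"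
  else if codes.contains "legacy_raw_live_route_disabled" then "route_violation"
  else if codes.contains "curated_engine_handoff_packet_missing" then "missing_curated_packet"
  else if codes.contains "curated_engine_handoff_shape_invalid" then "invalid_curated_packet"
  else if codes.contains "raw_live_payload_rejected" then "raw_payload_rejected"
  else if codes.any (fun code => PySem.Str.startswith code "execution_") then "execution_violation"
  else "unknown_violation"

-- ===== PORT B =====
-- Source B's module-level _PRIORITY dict literal (distinct keys, insertion order)
def pvPriority : PySem.Dict String (Nat × String) :=
  PySem.Dict.mk
    [ ("forbidden_authority_claim", (0, "authority_inflation")),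
      ("raw_external_child_core_bypass", (1, "cross_core_bypass")),
      ("root_spine_order_invalid", (2, "invalid_spine_order")),
      ("root_spine_required_links_missing", (2, "invalid_spine_order")),
      ("research_core_lineage_missing", (3, "missing_lineage")),
      ("engine_lineage_missing", (4, "missing_engine_processing")),
      ("adapter_lineage_missing", (5, "missing_adapter_layer")),
      ("legacy_raw_live_route_disabled", (6, "route_violation")),
      ("curated_engine_handoff_packet_missing", (7, "missing_curated_packet")),
      ("curated_engine_handoff_shape_invalid", (8, "invalid_curated_packet")),
      ("raw_live_payload_rejected", (9, "raw_payload_rejected")) ]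

-- Source B's loop body: score one code and keep the better (lower-priority-rank) entry
def pvStep (best : Nat × String) (code : String) : Nat × String :=
  let entry : Option (Nat × String) :=
    match PySem.Dict.get? pvPriority code with
    | some e => some e
    | none => if PySem.Str.startswith code "execution_" then some (10, "execution_violation") else none
  match entry with
  | some e => if e.1 < best.1 then e else best
  | none => best

def classify_violation_from_codes_py_alt (codes : List String) : String :=
  (codes.foldl pvStep (11, "unknown_violation")).2

-- ===== PRECONDITION & SPEC =====
def Spec_classify_violation_from_codes_py (codes : List String) (out : String) : Prop := out = classify_violation_from_codes_py_alt codes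
instance (codes : List String) (out : String) : Decidable (Spec_classify_violation_from_codes_py codes out) := by unfold Spec_classify_violation_from_codes_py; infer_instance

-- ===== CLAIM (what is proved, stated in full; the proofs are below) =====
def Claim_equal_classify_violation_from_codes_py : Prop := ∀ (codes : List String), Dom_classify_violation_from_codes_py codes → Spec_classify_violation_from_codes_py codes (classify_violation_from_codes_py codes)

-- ===== LEMMAS AND PROOFS =====

-- the rank B's pass gives a single code (11 = no rule applies)
def pvRank (c : String) : Nat :=
  if "forbidden_authority_claim" = c then 0
  else if "raw_external_child_core_bypass" = c then 1
  else if "root_spine_order_invalid" = c then 2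
  else if "root_spine_required_links_missing" = c then 2
  else if "research_core_lineage_missing" = c then 3
  else if "engine_lineage_missing" = c then 4
  else if "adapter_lineage_missing" = c then 5
  else if "legacy_raw_live_route_disabled" = c then 6
  else if "curated_engine_handoff_packet_missing" = c then 7
  else if "curated_engine_handoff_shape_invalid" = c then 8
  else if "raw_live_payload_rejected" = c then 9
  else if PySem.Str.startswith c "execution_" then 10
  else 11

def pvLabel (r : Nat) : String :=
  match r with
  | 0 => "authority_inflation"
  | 1 => "cross_core_bypass"
  | 2 => "invalid_spine_order"
  | 3 => "missing_lineage"
  | 4 => "missing_engine_processing"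
  | 5 => "missing_adapter_layer"
  | 6 => "route_violation"
  | 7 => "missing_curated_packet"
  | 8 => "invalid_curated_packet"
  | 9 => "raw_payload_rejected"
  | 10 => "execution_violation"
  | _ => "unknown_violation"

def pvMin (codes : List String) : Nat := codes.foldl (fun a c => min a (pvRank c)) 11

lemma pvRank_le (c : String) : pvRank c ≤ 11 := by
  unfold pvRank; repeat' split
  all_goals omega

lemma pvRank_key0 : pvRank "forbidden_authority_claim" = 0 := by decide
lemma pvRank_key1 : pvRank "raw_external_child_core_bypass" = 1 := by decide
lemma pvRank_key2 : pvRank "root_spine_order_invalid" = 2 := by decide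
lemma pvRank_key3 : pvRank "root_spine_required_links_missing" = 2 := by decide
lemma pvRank_key4 : pvRank "research_core_lineage_missing" = 3 := by decide
lemma pvRank_key5 : pvRank "engine_lineage_missing" = 4 := by decide
lemma pvRank_key6 : pvRank "adapter_lineage_missing" = 5 := by decide
lemma pvRank_key7 : pvRank "legacy_raw_live_route_disabled" = 6 := by decide
lemma pvRank_key8 : pvRank "curated_engine_handoff_packet_missing" = 7 := by decide
lemma pvRank_key9 : pvRank "curated_engine_handoff_shape_invalid" = 8 := by decide
lemma pvRank_key10 : pvRank "raw_live_payload_rejected" = 9 := by decide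

-- B's per-code entry, expressed through pvRank
lemma pvEntry_eq (c : String) :
    (match PySem.Dict.get? pvPriority c with
     | some e => some e
     | none => if PySem.Str.startswith c "execution_" then some ((10 : Nat), "execution_violation") else none)
    = (if pvRank c = 11 then none else some (pvRank c, pvLabel (pvRank c))) := by
  by_cases h0 : "forbidden_authority_claim" = c
  case pos => subst h0; decide
  by_cases h1 : "raw_external_child_core_bypass" = c
  case pos => subst h1; decide
  by_cases h2 : "root_spine_order_invalid" = c
  case pos => subst h2; decide
  by_cases h3 : "root_spine_required_links_missing" = c
  case pos => subst h3; decide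
  by_cases h4 : "research_core_lineage_missing" = c
  case pos => subst h4; decide
  by_cases h5 : "engine_lineage_missing" = c
  case pos => subst h5; decide
  by_cases h6 : "adapter_lineage_missing" = c
  case pos => subst h6; decide
  by_cases h7 : "legacy_raw_live_route_disabled" = c
  case pos => subst h7; decide
  by_cases h8 : "curated_engine_handoff_packet_missing" = c
  case pos => subst h8; decide
  by_cases h9 : "curated_engine_handoff_shape_invalid" = c
  case pos => subst h9; decide
  by_cases h10 : "raw_live_payload_rejected" = c
  case pos => subst h10; decide
  unfold pvPriority pvRank
  simp only [PySem.Dict.get?_mk_cons, beq_iff_eq, if_neg h0, if_neg h1, if_neg h2, if_neg h3, if_neg h4, if_neg h5, if_neg h6, if_neg h7, if_neg h8, if_neg h9, if_neg h10]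
  have hnil : PySem.Dict.get? (PySem.Dict.mk ([] : List (String × (Nat × String)))) c = none := rfl
  rw [hnil]
  by_cases hs : PySem.Chars.startswith c.toList ['e','x','e','c','u','t','i','o','n','_'] = true
  · simp [hs, pvLabel]
  · simp [hs]

lemma pvStep_eq (r : Nat) (c : String) (hr : r ≤ 11) :
    pvStep (r, pvLabel r) c = (min r (pvRank c), pvLabel (min r (pvRank c))) := by
  simp only [pvStep]
  rw [pvEntry_eq c]
  by_cases h11 : pvRank c = 11
  · rw [if_pos h11, h11, Nat.min_eq_left hr]
  · rw [if_neg h11]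
    by_cases hlt : pvRank c < r
    · simp only [hlt, if_pos, Nat.min_eq_right (Nat.le_of_lt hlt)]
    · simp only [hlt, if_false, Nat.min_eq_left (by omega : r ≤ pvRank c)]

lemma pvFold_eq (codes : List String) : ∀ (r : Nat), r ≤ 11 →
    codes.foldl pvStep (r, pvLabel r)
    = (codes.foldl (fun a c => min a (pvRank c)) r,
       pvLabel (codes.foldl (fun a c => min a (pvRank c)) r)) := by
  induction codes with
  | nil => intro r _; simp
  | cons c rest ih =>
    intro r hr
    simp only [List.foldl_cons]
    rw [pvStep_eq r c hr]
    exact ih _ (by have := pvRank_le c; omega)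

lemma pvAlt_eq (codes : List String) :
    classify_violation_from_codes_py_alt codes = pvLabel (pvMin codes) := by
  unfold classify_violation_from_codes_py_alt pvMin
  rw [show ((11 : Nat), "unknown_violation") = ((11 : Nat), pvLabel 11) from rfl,
      pvFold_eq codes 11 (le_refl _)]

lemma pvFold_min_le_init (l : List String) : ∀ r : Nat, l.foldl (fun a c => min a (pvRank c)) r ≤ r := by
  induction l with
  | nil => intro r; simp
  | cons x xs ih => intro r; simpa using le_trans (ih _) (min_le_left _ _)

lemma pvFold_min_mono (l : List String) : ∀ {r s : Nat}, r ≤ s →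
    l.foldl (fun a c => min a (pvRank c)) r ≤ l.foldl (fun a c => min a (pvRank c)) s := by
  induction l with
  | nil => intro r s h; simpa
  | cons x xs ih => intro r s h; simpa using ih (by omega)

lemma pvMin_le_of_mem {codes : List String} {c : String} (h : c ∈ codes) :
    pvMin codes ≤ pvRank c := by
  unfold pvMin
  induction codes with
  | nil => cases h
  | cons x rest ih =>
    simp only [List.foldl_cons]
    rcases List.mem_cons.mp h with rfl | hm
    · exact le_trans (pvFold_min_le_init rest _) (min_le_right _ _)
    · exact le_trans (pvFold_min_mono rest (min_le_left _ _)) (ih hm)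

lemma pvMin_attained (codes : List String) :
    pvMin codes = 11 ∨ ∃ c ∈ codes, pvRank c = pvMin codes := by
  unfold pvMin
  have shift : ∀ (l : List String) (r : Nat),
      l.foldl (fun a c => min a (pvRank c)) r = r ∨
      ∃ c ∈ l, pvRank c = l.foldl (fun a c => min a (pvRank c)) r := by
    intro l
    induction l with
    | nil => intro _; left; rfl
    | cons y ys ihy =>
      intro r
      simp only [List.foldl_cons]
      by_cases hy : pvRank y < r
      · have hmin : min r (pvRank y) = pvRank y := by omega
        rw [hmin]
        rcases ihy (pvRank y) with h | ⟨c, hc, hrc⟩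
        · right; exact ⟨y, List.mem_cons_self, by rw [h]⟩
        · right; exact ⟨c, List.mem_cons_of_mem _ hc, hrc⟩
      · have hmin : min r (pvRank y) = r := by omega
        rw [hmin]
        rcases ihy r with h | ⟨c, hc, hrc⟩
        · left; exact h
        · right; exact ⟨c, List.mem_cons_of_mem _ hc, hrc⟩
  exact shift codes 11

-- every code is one of the eleven table keys, or its rank is at least 10
lemma pvRank_cases (c : String) :
    c = "forbidden_authority_claim" ∨ c = "raw_external_child_core_bypass" ∨
    c = "root_spine_order_invalid" ∨ c = "root_spine_required_links_missing" ∨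
    c = "research_core_lineage_missing" ∨ c = "engine_lineage_missing" ∨
    c = "adapter_lineage_missing" ∨ c = "legacy_raw_live_route_disabled" ∨
    c = "curated_engine_handoff_packet_missing" ∨ c = "curated_engine_handoff_shape_invalid" ∨
    c = "raw_live_payload_rejected" ∨ 10 ≤ pvRank c := by
  unfold pvRank; repeat' split
  all_goals (try subst_vars)
  all_goals simp

lemma pvRank_ten {c : String} (h : pvRank c = 10) :
    PySem.Str.startswith c "execution_" = true := by
  revert h; unfold pvRank; repeat' split
  all_goals intro h
  all_goals first | assumption | omega

lemma pvStarts_rank {c : String} (h : PySem.Str.startswith c "execution_" = true) :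
    pvRank c = 10 := by
  unfold pvRank; repeat' split
  all_goals first | rfl | (subst_vars; revert h; decide)

lemma pvMin_spec (codes : List String) (i : Nat) (hi : i ≤ 10)
    (hlow : ∀ c ∈ codes, ¬ pvRank c < i)
    (hwit : ∃ c ∈ codes, pvRank c = i) : pvMin codes = i := by
  obtain ⟨c, hc, hr⟩ := hwit
  have h1 : pvMin codes ≤ i := hr ▸ pvMin_le_of_mem hc
  rcases pvMin_attained codes with h11 | ⟨d, hd, hrd⟩
  · omega
  · have := hlow d hd; omega

-- ===== VERDICT (by name: the statement is the Claim_ definition above) =====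
set_option maxHeartbeats 4000000 in
theorem classify_violation_from_codes_py_spec : Claim_equal_classify_violation_from_codes_py := by
  intro codes _
  unfold Spec_classify_violation_from_codes_py
  rw [pvAlt_eq]
  have memo : ∀ (k : String), codes.contains k = true → k ∈ codes := by
    intro k h; simpa using h
  unfold classify_violation_from_codes_py
  split_ifs with h1 h2 h3 h4 h5 h6 h7 h8 h9 h10 h11
  ·
    have hw : ∃ c ∈ codes, pvRank c = 0 := ⟨_, memo _ h1, pvRank_key0⟩
    rw [pvMin_spec codes 0 (by omega)
      (by intro c hc hlt
          rcases pvRank_cases c with rfl|rfl|rfl|rfl|rfl|rfl|rfl|rfl|rfl|rfl|rfl|hge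
          · rw [pvRank_key0] at hlt; omega
          · rw [pvRank_key1] at hlt; omega
          · rw [pvRank_key2] at hlt; omega
          · rw [pvRank_key3] at hlt; omega
          · rw [pvRank_key4] at hlt; omega
          · rw [pvRank_key5] at hlt; omega
          · rw [pvRank_key6] at hlt; omega
          · rw [pvRank_key7] at hlt; omega
          · rw [pvRank_key8] at hlt; omega
          · rw [pvRank_key9] at hlt; omega
          · rw [pvRank_key10] at hlt; omega
          · omega)
      hw]
    rfl
  ·
    have hw : ∃ c ∈ codes, pvRank c = 1 := ⟨_, memo _ h2, pvRank_key1⟩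
    rw [pvMin_spec codes 1 (by omega)
      (by intro c hc hlt
          rcases pvRank_cases c with rfl|rfl|rfl|rfl|rfl|rfl|rfl|rfl|rfl|rfl|rfl|hge
          · exact absurd hc (by simpa using h1)
          · rw [pvRank_key1] at hlt; omega
          · rw [pvRank_key2] at hlt; omega
          · rw [pvRank_key3] at hlt; omega
          · rw [pvRank_key4] at hlt; omega
          · rw [pvRank_key5] at hlt; omega
          · rw [pvRank_key6] at hlt; omega
          · rw [pvRank_key7] at hlt; omega
          · rw [pvRank_key8] at hlt; omega
          · rw [pvRank_key9] at hlt; omega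
          · rw [pvRank_key10] at hlt; omega
          · omega)
      hw]
    rfl
  ·
    have hw : ∃ c ∈ codes, pvRank c = 2 := by
      by_cases hA : codes.contains "root_spine_order_invalid" = true
      · exact ⟨_, memo _ hA, pvRank_key2⟩
      · simp only [Bool.not_eq_true] at hA
        rw [hA, Bool.false_or] at h3
        exact ⟨_, memo _ h3, pvRank_key3⟩
    rw [pvMin_spec codes 2 (by omega)
      (by intro c hc hlt
          rcases pvRank_cases c with rfl|rfl|rfl|rfl|rfl|rfl|rfl|rfl|rfl|rfl|rfl|hge
          · exact absurd hc (by simpa using h1)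
          · exact absurd hc (by simpa using h2)
          · rw [pvRank_key2] at hlt; omega
          · rw [pvRank_key3] at hlt; omega
          · rw [pvRank_key4] at hlt; omega
          · rw [pvRank_key5] at hlt; omega
          · rw [pvRank_key6] at hlt; omega
          · rw [pvRank_key7] at hlt; omega
          · rw [pvRank_key8] at hlt; omega
          · rw [pvRank_key9] at hlt; omega
          · rw [pvRank_key10] at hlt; omega
          · omega)
      hw]
    rfl
  ·
    have hw : ∃ c ∈ codes, pvRank c = 3 := ⟨_, memo _ h4, pvRank_key4⟩
    rw [pvMin_spec codes 3 (by omega)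
      (by intro c hc hlt
          rcases pvRank_cases c with rfl|rfl|rfl|rfl|rfl|rfl|rfl|rfl|rfl|rfl|rfl|hge
          · exact absurd hc (by simpa using h1)
          · exact absurd hc (by simpa using h2)
          · exact absurd hc (by simp only [Bool.or_eq_true] at h3; push Not at h3; simpa using h3.1)
          · exact absurd hc (by simp only [Bool.or_eq_true] at h3; push Not at h3; simpa using h3.2)
          · rw [pvRank_key4] at hlt; omega
          · rw [pvRank_key5] at hlt; omega
          · rw [pvRank_key6] at hlt; omega
          · rw [pvRank_key7] at hlt; omega
          · rw [pvRank_key8] at hlt; omega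
          · rw [pvRank_key9] at hlt; omega
          · rw [pvRank_key10] at hlt; omega
          · omega)
      hw]
    rfl
  ·
    have hw : ∃ c ∈ codes, pvRank c = 4 := ⟨_, memo _ h5, pvRank_key5⟩
    rw [pvMin_spec codes 4 (by omega)
      (by intro c hc hlt
          rcases pvRank_cases c with rfl|rfl|rfl|rfl|rfl|rfl|rfl|rfl|rfl|rfl|rfl|hge
          · exact absurd hc (by simpa using h1)
          · exact absurd hc (by simpa using h2)
          · exact absurd hc (by simp only [Bool.or_eq_true] at h3; push Not at h3; simpa using h3.1)
          · exact absurd hc (by simp only [Bool.or_eq_true] at h3; push Not at h3; simpa using h3.2)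
          · exact absurd hc (by simpa using h4)
          · rw [pvRank_key5] at hlt; omega
          · rw [pvRank_key6] at hlt; omega
          · rw [pvRank_key7] at hlt; omega
          · rw [pvRank_key8] at hlt; omega
          · rw [pvRank_key9] at hlt; omega
          · rw [pvRank_key10] at hlt; omega
          · omega)
      hw]
    rfl
  ·
    have hw : ∃ c ∈ codes, pvRank c = 5 := ⟨_, memo _ h6, pvRank_key6⟩
    rw [pvMin_spec codes 5 (by omega)
      (by intro c hc hlt
          rcases pvRank_cases c with rfl|rfl|rfl|rfl|rfl|rfl|rfl|rfl|rfl|rfl|rfl|hge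
          · exact absurd hc (by simpa using h1)
          · exact absurd hc (by simpa using h2)
          · exact absurd hc (by simp only [Bool.or_eq_true] at h3; push Not at h3; simpa using h3.1)
          · exact absurd hc (by simp only [Bool.or_eq_true] at h3; push Not at h3; simpa using h3.2)
          · exact absurd hc (by simpa using h4)
          · exact absurd hc (by simpa using h5)
          · rw [pvRank_key6] at hlt; omega
          · rw [pvRank_key7] at hlt; omega
          · rw [pvRank_key8] at hlt; omega
          · rw [pvRank_key9] at hlt; omega
          · rw [pvRank_key10] at hlt; omega
          · omega)
      hw]
    rfl
  ·
    have hw : ∃ c ∈ codes, pvRank c = 6 := ⟨_, memo _ h7, pvRank_key7⟩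
    rw [pvMin_spec codes 6 (by omega)
      (by intro c hc hlt
          rcases pvRank_cases c with rfl|rfl|rfl|rfl|rfl|rfl|rfl|rfl|rfl|rfl|rfl|hge
          · exact absurd hc (by simpa using h1)
          · exact absurd hc (by simpa using h2)
          · exact absurd hc (by simp only [Bool.or_eq_true] at h3; push Not at h3; simpa using h3.1)
          · exact absurd hc (by simp only [Bool.or_eq_true] at h3; push Not at h3; simpa using h3.2)
          · exact absurd hc (by simpa using h4)
          · exact absurd hc (by simpa using h5)
          · exact absurd hc (by simpa using h6)
          · rw [pvRank_key7] at hlt; omega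
          · rw [pvRank_key8] at hlt; omega
          · rw [pvRank_key9] at hlt; omega
          · rw [pvRank_key10] at hlt; omega
          · omega)
      hw]
    rfl
  ·
    have hw : ∃ c ∈ codes, pvRank c = 7 := ⟨_, memo _ h8, pvRank_key8⟩
    rw [pvMin_spec codes 7 (by omega)
      (by intro c hc hlt
          rcases pvRank_cases c with rfl|rfl|rfl|rfl|rfl|rfl|rfl|rfl|rfl|rfl|rfl|hge
          · exact absurd hc (by simpa using h1)
          · exact absurd hc (by simpa using h2)
          · exact absurd hc (by simp only [Bool.or_eq_true] at h3; push Not at h3; simpa using h3.1)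
          · exact absurd hc (by simp only [Bool.or_eq_true] at h3; push Not at h3; simpa using h3.2)
          · exact absurd hc (by simpa using h4)
          · exact absurd hc (by simpa using h5)
          · exact absurd hc (by simpa using h6)
          · exact absurd hc (by simpa using h7)
          · rw [pvRank_key8] at hlt; omega
          · rw [pvRank_key9] at hlt; omega
          · rw [pvRank_key10] at hlt; omega
          · omega)
      hw]
    rfl
  ·
    have hw : ∃ c ∈ codes, pvRank c = 8 := ⟨_, memo _ h9, pvRank_key9⟩
    rw [pvMin_spec codes 8 (by omega)
      (by intro c hc hlt
          rcases pvRank_cases c with rfl|rfl|rfl|rfl|rfl|rfl|rfl|rfl|rfl|rfl|rfl|hge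
          · exact absurd hc (by simpa using h1)
          · exact absurd hc (by simpa using h2)
          · exact absurd hc (by simp only [Bool.or_eq_true] at h3; push Not at h3; simpa using h3.1)
          · exact absurd hc (by simp only [Bool.or_eq_true] at h3; push Not at h3; simpa using h3.2)
          · exact absurd hc (by simpa using h4)
          · exact absurd hc (by simpa using h5)
          · exact absurd hc (by simpa using h6)
          · exact absurd hc (by simpa using h7)
          · exact absurd hc (by simpa using h8)
          · rw [pvRank_key9] at hlt; omega
          · rw [pvRank_key10] at hlt; omega
          · omega)
      hw]
    rfl
  ·
    have hw : ∃ c ∈ codes, pvRank c = 9 := ⟨_, memo _ h10, pvRank_key10⟩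
    rw [pvMin_spec codes 9 (by omega)
      (by intro c hc hlt
          rcases pvRank_cases c with rfl|rfl|rfl|rfl|rfl|rfl|rfl|rfl|rfl|rfl|rfl|hge
          · exact absurd hc (by simpa using h1)
          · exact absurd hc (by simpa using h2)
          · exact absurd hc (by simp only [Bool.or_eq_true] at h3; push Not at h3; simpa using h3.1)
          · exact absurd hc (by simp only [Bool.or_eq_true] at h3; push Not at h3; simpa using h3.2)
          · exact absurd hc (by simpa using h4)
          · exact absurd hc (by simpa using h5)
          · exact absurd hc (by simpa using h6)
          · exact absurd hc (by simpa using h7)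
          · exact absurd hc (by simpa using h8)
          · exact absurd hc (by simpa using h9)
          · rw [pvRank_key10] at hlt; omega
          · omega)
      hw]
    rfl
  ·
    have hw : ∃ c ∈ codes, pvRank c = 10 := by
      obtain ⟨c, hc, hsw⟩ := List.any_eq_true.mp h11
      exact ⟨c, hc, pvStarts_rank (by simpa using hsw)⟩
    rw [pvMin_spec codes 10 (by omega)
      (by intro c hc hlt
          rcases pvRank_cases c with rfl|rfl|rfl|rfl|rfl|rfl|rfl|rfl|rfl|rfl|rfl|hge
          · exact absurd hc (by simpa using h1)
          · exact absurd hc (by simpa using h2)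
          · exact absurd hc (by simp only [Bool.or_eq_true] at h3; push Not at h3; simpa using h3.1)
          · exact absurd hc (by simp only [Bool.or_eq_true] at h3; push Not at h3; simpa using h3.2)
          · exact absurd hc (by simpa using h4)
          · exact absurd hc (by simpa using h5)
          · exact absurd hc (by simpa using h6)
          · exact absurd hc (by simpa using h7)
          · exact absurd hc (by simpa using h8)
          · exact absurd hc (by simpa using h9)
          · exact absurd hc (by simpa using h10)
          · omega)
      hw]
    rfl
  · rcases pvMin_attained codes with he | ⟨c, hc, hrc⟩
    · rw [he]; rfl
    · have hle := pvRank_le c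
      have h11' : pvRank c = 11 := by
        rcases pvRank_cases c with rfl|rfl|rfl|rfl|rfl|rfl|rfl|rfl|rfl|rfl|rfl|hge
        · exact absurd hc (by simpa using h1)
        · exact absurd hc (by simpa using h2)
        · exact absurd hc (by simp only [Bool.or_eq_true] at h3; push Not at h3; simpa using h3.1)
        · exact absurd hc (by simp only [Bool.or_eq_true] at h3; push Not at h3; simpa using h3.2)
        · exact absurd hc (by simpa using h4)
        · exact absurd hc (by simpa using h5)
        · exact absurd hc (by simpa using h6)
        · exact absurd hc (by simpa using h7)
        · exact absurd hc (by simpa using h8)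
        · exact absurd hc (by simpa using h9)
        · exact absurd hc (by simpa using h10)
        · have hne : pvRank c ≠ 10 := by
            intro he10
            exact h11 (List.any_eq_true.mpr ⟨c, hc, pvRank_ten he10⟩)
          omega
      rw [← hrc, h11']; rfl
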